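-- pv_equiv track=rewrite | github.com/JohnGarcia10/101L_002L | Assignments/Week10.py/New10.py | create_reported_month_dict
-- ===== SOURCE A (Python) =====
-- def create_reported_month_dict(u_list):
--     new_d = {}
--     for i in u_list:
--         if i[1][:2] in new_d:
--             new_d[i[1][:2]] = new_d[i[1][:2]] +1
--         else:
--             new_d[i[1][:2]] = 1
--     return new_d
-- ===== SOURCE B (Python) =====
-- def create_reported_month_dict(u_list):
--     prefixes = [i[1][:2] for i in u_list]
--     new_d = {}
--     for p in prefixes:
--         if p not in new_d:
--             new_d[p] = prefixes.count(p)
--     return new_d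
-- ===== Notes on version B (the rewrite author's own statement) =====
-- stated objective: alternative
-- what changed: Replaces the incremental hash-accumulation (increment-or-initialise per record) by a two-phase count-per-distinct-prefix strategy: build the prefix list once, then for each first-seen prefix insert its total list.count in one step.
import Mathlib
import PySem

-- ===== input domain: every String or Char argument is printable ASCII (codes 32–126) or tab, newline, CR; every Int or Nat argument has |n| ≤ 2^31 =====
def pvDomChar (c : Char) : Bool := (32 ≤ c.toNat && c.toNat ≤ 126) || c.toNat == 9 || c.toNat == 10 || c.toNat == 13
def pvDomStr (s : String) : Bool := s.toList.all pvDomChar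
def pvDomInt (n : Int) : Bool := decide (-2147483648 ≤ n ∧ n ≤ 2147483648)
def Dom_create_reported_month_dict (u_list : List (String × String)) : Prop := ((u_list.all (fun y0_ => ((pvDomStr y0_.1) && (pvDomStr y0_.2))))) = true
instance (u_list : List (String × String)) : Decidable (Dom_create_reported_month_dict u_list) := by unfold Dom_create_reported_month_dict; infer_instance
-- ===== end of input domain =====

-- B replaces A's per-record increment-or-initialise dict accumulation by building the prefix
-- list once and, at each first occurrence of a prefix, inserting its total count of the whole
-- list in one step (objective: alternative decomposition; same values, same key order).

-- ===== PORT A =====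
def create_reported_month_dict (u_list : List (String × String)) : List (String × Int) :=
  (u_list.foldl (fun new_d i =>
      if new_d.contains (PySem.Str.slice i.2 none (some 2)) then
        new_d.insert (PySem.Str.slice i.2 none (some 2))
          (new_d.getD (PySem.Str.slice i.2 none (some 2)) 0 + 1)
      else
        new_d.insert (PySem.Str.slice i.2 none (some 2)) 1)
    PySem.Dict.empty).items

-- ===== PORT B =====
def create_reported_month_dict_alt (u_list : List (String × String)) : List (String × Int) :=
  let prefixes := u_list.map (fun i => PySem.Str.slice i.2 none (some 2))
  (prefixes.foldl (fun new_d p =>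
      if new_d.contains p then new_d
      else new_d.insert p ((prefixes.count p : Int)))
    PySem.Dict.empty).items

-- ===== PRECONDITION & SPEC =====
def Spec_create_reported_month_dict (u_list : List (String × String)) (out : List (String × Int)) : Prop := out = create_reported_month_dict_alt u_list
instance (u_list : List (String × String)) (out : List (String × Int)) : Decidable (Spec_create_reported_month_dict u_list out) := by unfold Spec_create_reported_month_dict; infer_instance

-- ===== CLAIM (what is proved, stated in full; the proofs are below) =====
def Claim_equal_create_reported_month_dict : Prop := ∀ (u_list : List (String × String)), Dom_create_reported_month_dict u_list → Spec_create_reported_month_dict u_list (create_reported_month_dict u_list)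

-- ===== LEMMAS AND PROOFS =====

-- A's loop body is pointwise the Counter step (in the missing-key branch getD … 0 = 0).
theorem stepA_eq_counter_step :
    (fun (d : PySem.Dict String Int) (i : String × String) =>
      if d.contains (PySem.Str.slice i.2 none (some 2)) then
        d.insert (PySem.Str.slice i.2 none (some 2))
          (d.getD (PySem.Str.slice i.2 none (some 2)) 0 + 1)
      else d.insert (PySem.Str.slice i.2 none (some 2)) 1)
    = (fun (d : PySem.Dict String Int) (i : String × String) =>
        d.insert (PySem.Str.slice i.2 none (some 2))
          (d.getD (PySem.Str.slice i.2 none (some 2)) 0 + 1)) := by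
  funext d i
  generalize PySem.Str.slice i.2 none (some 2) = k
  by_cases hc : d.contains k = true
  · simp [hc]
  · simp only [Bool.not_eq_true] at hc
    simp [hc, PySem.Dict.getD_of_not_contains d 0 hc]

-- B's first-occurrence-insert loop: the new keys appended are exactly the fresh part of
-- Set.update of the dict's keys by the scanned list.
theorem foldB_items (f : String → Int) :
    ∀ (l : List String) (d : PySem.Dict String Int),
      (l.foldl (fun new_d p => if new_d.contains p then new_d else new_d.insert p (f p)) d).items
        = d.items ++ ((PySem.Set.update d.keys l).drop d.keys.length).map (fun k => (k, f k)) := by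
  intro l
  induction l with
  | nil =>
      intro d
      simp [PySem.Set.update_nil]
  | cons p l ih =>
      intro d
      by_cases hc : d.contains p = true
      · have hmem : p ∈ d.keys := (PySem.Dict.contains_iff_mem_keys d p).mp hc
        simp only [List.foldl_cons, hc, if_pos, PySem.Set.update_cons,
          PySem.Set.add_of_mem hmem]
        exact ih d
      · simp only [Bool.not_eq_true] at hc
        have hmem : p ∉ d.keys := fun h =>
          by simp [(PySem.Dict.contains_iff_mem_keys d p).mpr h] at hc
        have hkeys : (d.insert p (f p)).keys = d.keys ++ [p] :=
          PySem.Dict.keys_insert_of_not_contains d (f p) hc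
        have hitems : (d.insert p (f p)).items = d.items ++ [(p, f p)] :=
          PySem.Dict.items_insert_of_not_contains d (f p) hc
        have := ih (d.insert p (f p))
        rw [List.foldl_cons, hc, if_neg (by simp), this, hkeys, hitems,
          PySem.Set.update_cons, PySem.Set.add_of_not_mem hmem]
        rw [PySem.Set.update_eq_append_filter]
        simp [List.append_assoc]
  -- (the two sides agree: the fresh suffix of the update splits off p first)

theorem create_reported_month_dict_eq_counter (u_list : List (String × String)) :
    create_reported_month_dict u_list
      = (PySem.Dict.counter (u_list.map (fun i => PySem.Str.slice i.2 none (some 2)))).items := by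
  unfold create_reported_month_dict
  rw [← PySem.Dict.foldl_insert_getD_add_one_eq_counter, List.foldl_map,
    stepA_eq_counter_step]

-- ===== VERDICT (by name: the statement is the Claim_ definition above) =====
theorem create_reported_month_dict_spec : Claim_equal_create_reported_month_dict := by
  intro u_list _
  unfold Spec_create_reported_month_dict
  rw [create_reported_month_dict_eq_counter, PySem.Dict.items_counter]
  unfold create_reported_month_dict_alt
  rw [foldB_items]
  simp only [PySem.Dict.keys_empty, PySem.Set.update_nil_left]
  rfl
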